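-- pv_equiv track=rewrite | github.com/suUdong/crypto-trader | dashboard/data.py | fear_greed_zone_label
-- ===== SOURCE A (Python) =====
-- FEAR_GREED_ZONES: list[tuple[int, int, str, str]] = [
--     (0, 20, "극단적 공포", "#ff4444"),
--     (20, 40, "공포", "#ff8c42"),
--     (40, 60, "중립", "#ffc75f"),
--     (60, 80, "탐욕", "#7bc67e"),
--     (80, 100, "극단적 탐욕", "#44bb44"),
-- ]
--
-- def fear_greed_zone_label(value: int | None) -> str:
--     """Return Korean label for Fear & Greed index value."""
--     if value is None:
--         return "데이터 없음"
--     for low, high, label, _color in FEAR_GREED_ZONES: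
--         if low <= value < high:
--             return label
--     if value >= 100:
--         return "극단적 탐욕"
--     return "데이터 없음"
-- ===== SOURCE B (Python) =====
-- def fear_greed_zone_label(value):
--     """Return Korean label for Fear & Greed index value."""
--     if value is None or value < 0:
--         return "데이터 없음"
--     labels = ["극단적 공포", "공포", "중립", "탐욕", "극단적 탐욕"]
--     return labels[min(value // 20, 4)]
-- ===== Notes on version B (the rewrite author's own statement) =====
-- stated objective: simpler
-- what changed: Replaces the linear scan over FEAR_GREED_ZONES plus fall-through branches with a direct arithmetic index min(value // 20, 4) into a label list, guarded by None/negative.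
import Mathlib
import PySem

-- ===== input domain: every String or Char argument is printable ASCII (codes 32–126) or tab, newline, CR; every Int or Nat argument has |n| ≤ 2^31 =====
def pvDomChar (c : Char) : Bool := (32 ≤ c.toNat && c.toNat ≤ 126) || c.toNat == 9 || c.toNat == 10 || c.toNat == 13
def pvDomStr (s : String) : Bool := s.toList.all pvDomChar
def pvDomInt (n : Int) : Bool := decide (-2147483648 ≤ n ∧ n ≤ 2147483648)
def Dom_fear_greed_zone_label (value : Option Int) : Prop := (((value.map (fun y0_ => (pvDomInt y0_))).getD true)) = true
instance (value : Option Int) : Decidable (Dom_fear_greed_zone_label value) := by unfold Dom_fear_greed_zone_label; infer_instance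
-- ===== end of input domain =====

-- B replaces A's linear scan over FEAR_GREED_ZONES with a direct arithmetic bucket index (simpler).


-- ===== PORT A =====
def fgZones : List (Int × Int × String × String) :=
  [(0, 20, "극단적 공포", "#ff4444"),
   (20, 40, "공포", "#ff8c42"),
   (40, 60, "중립", "#ffc75f"),
   (60, 80, "탐욕", "#7bc67e"),
   (80, 100, "극단적 탐욕", "#44bb44")]

-- the for-loop with early return: first zone whose bounds bracket value
def fgScan (value : Int) : List (Int × Int × String × String) → Option String
  | [] => none
  | (low, high, label, _color) :: rest =>
    if low ≤ value ∧ value < high then some label else fgScan value rest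

def fear_greed_zone_label (value : Option Int) : String :=
  match value with
  | none => "데이터 없음"
  | some v =>
    match fgScan v fgZones with
    | some label => label
    | none => if v ≥ 100 then "극단적 탐욕" else "데이터 없음"

-- ===== PORT B =====
-- B: arithmetic bucket index; labels[idx] with idx = min(v // 20, 4) is always in range
-- (pyGet? is exact for the in-range index; the getD default is unreachable)
def fear_greed_zone_label_alt (value : Option Int) : String :=
  match value with
  | none => "데이터 없음"
  | some v =>
    if v < 0 then "데이터 없음"
    else
      let labels : List String := ["극단적 공포", "공포", "중립", "탐욕", "극단적 탐욕"]
      (PySem.List.pyGet? labels (min (PySem.Int.floordiv v 20) 4)).getD "데이터 없음"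

-- ===== PRECONDITION & SPEC =====
def Spec_fear_greed_zone_label (value : Option Int) (out : String) : Prop := out = fear_greed_zone_label_alt value
instance (value : Option Int) (out : String) : Decidable (Spec_fear_greed_zone_label value out) := by unfold Spec_fear_greed_zone_label; infer_instance

-- ===== CLAIM (what is proved, stated in full; the proofs are below) =====
def Claim_equal_fear_greed_zone_label : Prop := ∀ (value : Option Int), Dom_fear_greed_zone_label value → Spec_fear_greed_zone_label value (fear_greed_zone_label value)

-- ===== LEMMAS AND PROOFS =====

-- ===== VERDICT (by name: the statement is the Claim_ definition above) =====
theorem fear_greed_zone_label_spec : Claim_equal_fear_greed_zone_label := by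
  intro value _
  unfold Spec_fear_greed_zone_label
  match value with
  | none => rfl
  | some v =>
    simp only [fear_greed_zone_label, fear_greed_zone_label_alt, fgZones, fgScan]
    rcases lt_or_ge v 0 with h | h
    · simp [show ¬ (0 ≤ v) by omega, h, show ¬ (v ≥ 100) by omega,
        show ¬ (20 ≤ v) by omega, show ¬ (40 ≤ v) by omega,
        show ¬ (60 ≤ v) by omega, show ¬ (80 ≤ v) by omega]
    · rw [PySem.Int.floordiv_eq_ediv_of_pos (by omega)]
      simp only [show ¬ (v < 0) by omega, if_false]
      rcases lt_or_ge v 20 with h1 | h1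
      · have hm : min (v / 20) 4 = 0 := by omega
        simp [h, h1, hm, PySem.List.pyGet?, PySem.List.pyIdx?]
      · rcases lt_or_ge v 40 with h2 | h2
        · have hm : min (v / 20) 4 = 1 := by omega
          simp [show ¬ (v < 20) by omega, h1, h2, hm, PySem.List.pyGet?, PySem.List.pyIdx?]
        · rcases lt_or_ge v 60 with h3 | h3
          · have hm : min (v / 20) 4 = 2 := by omega
            simp [show ¬ (v < 20) by omega, show ¬ (v < 40) by omega, h2, h3, hm,
              PySem.List.pyGet?, PySem.List.pyIdx?]
          · rcases lt_or_ge v 80 with h4 | h4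
            · have hm : min (v / 20) 4 = 3 := by omega
              simp [show ¬ (v < 20) by omega, show ¬ (v < 40) by omega, show ¬ (v < 60) by omega,
                h3, h4, hm, PySem.List.pyGet?, PySem.List.pyIdx?]
            · have hm : min (v / 20) 4 = 4 := by omega
              rcases lt_or_ge v 100 with h5 | h5
              · simp [show ¬ (v < 20) by omega, show ¬ (v < 40) by omega, show ¬ (v < 60) by omega,
                  show ¬ (v < 80) by omega, h4, h5, hm, PySem.List.pyGet?, PySem.List.pyIdx?]
              · simp [show ¬ (v < 20) by omega, show ¬ (v < 40) by omega, show ¬ (v < 60) by omega,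
                  show ¬ (v < 80) by omega, show ¬ (v < 100) by omega, show v ≥ 100 by omega, hm,
                  PySem.List.pyGet?, PySem.List.pyIdx?]
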